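-- pv_equiv track=rewrite | github.com/Sib-asian/Exchange-2.0 | src/ocr.py | _compute_streaks_from_results
-- ===== SOURCE A (Python) =====
-- def _compute_streaks_from_results(results: list[tuple[int, int]]) -> tuple[int, int]:
--     """Ritorna (scoring_streak, clean_sheet_streak) su risultati recenti."""
--     scoring = 0
--     clean_sheet = 0
--     for gf, gs in results:
--         if gf > 0:
--             scoring += 1
--         else:
--             break
--     for gf, gs in results:
--         if gs == 0:
--             clean_sheet += 1
--         else:
--             break
--     return scoring, clean_sheet
-- ===== SOURCE B (Python) =====
-- def _compute_streaks_from_results(results: list[tuple[int, int]]) -> tuple[int, int]: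
--     scoring = 0
--     clean_sheet = 0
--     scoring_active = True
--     clean_active = True
--     for gf, gs in results:
--         if scoring_active:
--             if gf > 0:
--                 scoring += 1
--             else:
--                 scoring_active = False
--         if clean_active:
--             if gs == 0:
--                 clean_sheet += 1
--             else:
--                 clean_active = False
--         if not (scoring_active or clean_active):
--             break
--     return scoring, clean_sheet
-- ===== Notes on version B (the rewrite author's own statement) =====
-- stated objective: alternative
-- what changed: Replaces A's two independent break-loops over the list with a single traversal that maintains both counters plus an active flag per streak and stops once both streaks are broken.
import Mathlib
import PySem

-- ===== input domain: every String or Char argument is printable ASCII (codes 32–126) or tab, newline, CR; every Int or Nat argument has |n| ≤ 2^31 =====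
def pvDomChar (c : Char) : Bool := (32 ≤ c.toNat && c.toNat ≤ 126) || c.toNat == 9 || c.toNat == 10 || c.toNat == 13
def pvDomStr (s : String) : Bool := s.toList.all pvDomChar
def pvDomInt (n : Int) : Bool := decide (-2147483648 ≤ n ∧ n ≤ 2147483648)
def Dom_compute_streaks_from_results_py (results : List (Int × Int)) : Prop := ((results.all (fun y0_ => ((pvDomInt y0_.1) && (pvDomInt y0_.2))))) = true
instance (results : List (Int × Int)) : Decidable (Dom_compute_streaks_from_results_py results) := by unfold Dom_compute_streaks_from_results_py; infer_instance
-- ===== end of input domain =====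

-- ===== PORT A =====
-- B replaces A's two break-loops with one traversal keeping both counters and an active flag per streak.
def pvScoringLoop : List (Int × Int) → Int → Int
  | [], acc => acc
  | (gf, _) :: rest, acc => if gf > 0 then pvScoringLoop rest (acc + 1) else acc

def pvCleanLoop : List (Int × Int) → Int → Int
  | [], acc => acc
  | (_, gs) :: rest, acc => if gs == 0 then pvCleanLoop rest (acc + 1) else acc

def compute_streaks_from_results_py (results : List (Int × Int)) : Int × Int :=
  (pvScoringLoop results 0, pvCleanLoop results 0)

-- ===== PORT B =====
def pvDualLoop : List (Int × Int) → Int → Int → Bool → Bool → Int × Int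
  | [], scoring, clean, _, _ => (scoring, clean)
  | (gf, gs) :: rest, scoring, clean, sa, ca =>
    let p1 : Int × Bool := if sa then (if gf > 0 then (scoring + 1, sa) else (scoring, false)) else (scoring, sa)
    let p2 : Int × Bool := if ca then (if gs == 0 then (clean + 1, ca) else (clean, false)) else (clean, ca)
    if !(p1.2 || p2.2) then (p1.1, p2.1)
    else pvDualLoop rest p1.1 p2.1 p1.2 p2.2

def compute_streaks_from_results_py_alt (results : List (Int × Int)) : Int × Int :=
  pvDualLoop results 0 0 true true

-- ===== PRECONDITION & SPEC =====
def Spec_compute_streaks_from_results_py (results : List (Int × Int)) (out : Int × Int) : Prop := out = compute_streaks_from_results_py_alt results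
instance (results : List (Int × Int)) (out : Int × Int) : Decidable (Spec_compute_streaks_from_results_py results out) := by unfold Spec_compute_streaks_from_results_py; infer_instance

-- ===== CLAIM (what is proved, stated in full; the proofs are below) =====
def Claim_equal_compute_streaks_from_results_py : Prop := ∀ (results : List (Int × Int)), Dom_compute_streaks_from_results_py results → Spec_compute_streaks_from_results_py results (compute_streaks_from_results_py results)

-- ===== LEMMAS AND PROOFS =====

-- ===== VERDICT (by name: the statement is the Claim_ definition above) =====
theorem pvDualLoop_eq (l : List (Int × Int)) (s c : Int) (sa ca : Bool) :
    pvDualLoop l s c sa ca =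
      ((if sa then pvScoringLoop l s else s), (if ca then pvCleanLoop l c else c)) := by
  induction l generalizing s c sa ca with
  | nil => cases sa <;> cases ca <;> simp [pvDualLoop, pvScoringLoop, pvCleanLoop]
  | cons h t ih =>
    obtain ⟨gf, gs⟩ := h
    cases sa <;> cases ca <;>
      simp only [pvDualLoop, pvScoringLoop, pvCleanLoop] <;>
      by_cases hgf : gf > 0 <;> by_cases hgs : gs = 0 <;>
      simp [hgf, hgs, ih]

theorem compute_streaks_from_results_py_spec : Claim_equal_compute_streaks_from_results_py := by
  intro results _
  unfold Spec_compute_streaks_from_results_py compute_streaks_from_results_py compute_streaks_from_results_py_alt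
  rw [pvDualLoop_eq]
  simp
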